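-- pv_equiv track=rewrite | github.com/menyp/euro-basketball-scheduler | validator.py | _rest_penalty_and_min_gap
-- ===== SOURCE A (Python) =====
-- _REST_TARGET_GAP = 240          # scheduler.py REST_TARGET_GAP
--
-- def _rest_penalty_and_min_gap(slots):
--     """Squared-deficit rest penalty (solver formula) + tightest gap, for one
--     team-day's sorted slot minutes."""
--     penalty, min_gap = 0, None
--     for i in range(len(slots)):
--         for j in range(i + 1, len(slots)):
--             gap = slots[j] - slots[i]
--             if min_gap is None or gap < min_gap:
--                 min_gap = gap
--             if gap < _REST_TARGET_GAP:
--                 penalty += (_REST_TARGET_GAP - gap) ** 2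
--     return penalty, min_gap
-- ===== SOURCE B (Python) =====
-- _REST_TARGET_GAP = 240          # scheduler.py REST_TARGET_GAP
--
-- def _rest_penalty_and_min_gap(slots):
--     """Single left-to-right pass: the tightest gap ending at each element is
--     that element minus the running maximum of everything before it, so the
--     global min gap needs one candidate per element instead of a full pair
--     scan; the penalty is accumulated per element over the already-seen
--     prefix."""
--     penalty = 0
--     min_gap = None
--     hi = None          # max of the elements seen so far
--     seen = []
--     for x in slots:
--         if hi is not None:
--             g = x - hi
--             if min_gap is None or g < min_gap:
--                 min_gap = g
--         penalty += sum((_REST_TARGET_GAP - (x - y)) ** 2 for y in seen if x - y < _REST_TARGET_GAP)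
--         if hi is None or x > hi:
--             hi = x
--         seen.append(x)
--     return penalty, min_gap
-- ===== Notes on version B (the rewrite author's own statement) =====
-- stated objective: alternative
-- what changed: Replaced the nested all-pairs index loops with a single left-to-right pass: the minimum gap is taken from one candidate per element (element minus the running maximum of the prefix) instead of all pairs, and the penalty is accumulated per element over the already-seen prefix.
import Mathlib
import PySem

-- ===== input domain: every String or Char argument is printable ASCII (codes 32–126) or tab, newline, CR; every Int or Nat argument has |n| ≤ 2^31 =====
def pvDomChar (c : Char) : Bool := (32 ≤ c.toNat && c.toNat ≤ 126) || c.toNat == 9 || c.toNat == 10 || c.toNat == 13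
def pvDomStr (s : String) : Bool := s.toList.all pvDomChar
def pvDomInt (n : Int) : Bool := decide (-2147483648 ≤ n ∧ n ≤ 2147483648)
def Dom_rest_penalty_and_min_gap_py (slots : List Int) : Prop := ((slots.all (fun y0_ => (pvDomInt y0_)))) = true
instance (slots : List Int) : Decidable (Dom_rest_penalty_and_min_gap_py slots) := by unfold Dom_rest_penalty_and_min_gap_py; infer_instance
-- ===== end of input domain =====

-- B replaces A's all-pairs scan by a single left-to-right pass: min gap via a
-- running maximum (one candidate per element), penalty accumulated per element
-- over the already-seen prefix; same return value (A does not mutate its input).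

-- ===== PORT A =====
def rest_penalty_and_min_gap_py (slots : List Int) : Int × Option Int :=
  let n : Int := slots.length
  (PySem.List.pyRange 0 n 1).foldl
    (fun (st : Int × Option Int) (i : Int) =>
      (PySem.List.pyRange (i + 1) n 1).foldl
        (fun (st2 : Int × Option Int) (j : Int) =>
          let gap := PySem.List.pyGetD slots j 0 - PySem.List.pyGetD slots i 0
          let mg : Option Int :=
            match st2.2 with
            | none => some gap
            | some m => if gap < m then some gap else some m
          let p : Int := if gap < 240 then st2.1 + (240 - gap) ^ 2 else st2.1
          (p, mg))
        st)
    (0, none)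

-- ===== PORT B =====
def rest_penalty_and_min_gap_py_alt (slots : List Int) : Int × Option Int :=
  let st :=
    slots.foldl
      (fun (st : Int × Option Int × Option Int × List Int) (x : Int) =>
        let mg : Option Int :=
          match st.2.2.1 with
          | none => st.2.1
          | some h =>
            let g := x - h
            match st.2.1 with
            | none => some g
            | some m => if g < m then some g else some m
        let p : Int :=
          st.1 + st.2.2.2.foldl (fun s y => if x - y < 240 then s + (240 - (x - y)) ^ 2 else s) 0
        let hi : Option Int :=
          match st.2.2.1 with
          | none => some x
          | some h => if x > h then some x else some h
        (p, mg, hi, st.2.2.2 ++ [x]))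
      (0, none, none, [])
  (st.1, st.2.1)

-- ===== PRECONDITION & SPEC =====
def Spec_rest_penalty_and_min_gap_py (slots : List Int) (out : Int × Option Int) : Prop := out = rest_penalty_and_min_gap_py_alt slots
instance (slots : List Int) (out : Int × Option Int) : Decidable (Spec_rest_penalty_and_min_gap_py slots out) := by unfold Spec_rest_penalty_and_min_gap_py; infer_instance

-- ===== CLAIM (what is proved, stated in full; the proofs are below) =====
def Claim_equal_rest_penalty_and_min_gap_py : Prop := ∀ (slots : List Int), Dom_rest_penalty_and_min_gap_py slots → Spec_rest_penalty_and_min_gap_py slots (rest_penalty_and_min_gap_py slots)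

-- ===== LEMMAS AND PROOFS =====

-- the pairwise penalty term (x is the earlier slot, y the later one)
def pvPen (x y : Int) : Int := if y - x < 240 then (240 - (y - x)) ^ 2 else 0

-- total penalty, grouped by the earlier element (A's grouping)
def pvP : List Int → Int
  | [] => 0
  | x :: xs => (xs.map (pvPen x)).sum + pvP xs

-- all pairwise gaps, grouped by the earlier element
def pvGapsA : List Int → List Int
  | [] => []
  | x :: xs => xs.map (· - x) ++ pvGapsA xs

-- pairwise gaps of l when a previous maximum h is also available
def pvGapsA' (h : Int) (l : List Int) : List Int := l.map (· - h) ++ pvGapsA l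

-- B's min-gap candidates: element minus running maximum of the prefix
def pvGapsB : Int → List Int → List Int
  | _, [] => []
  | h, x :: xs => (x - h) :: pvGapsB (max h x) xs

-- Python's `if min_gap is None or gap < min_gap` update
def pvOmin (m : Option Int) (g : Int) : Option Int :=
  match m with
  | none => some g
  | some m => if g < m then some g else some m

def pvStepA (x : Int) (st : Int × Option Int) (y : Int) : Int × Option Int :=
  let gap := y - x
  let mg : Option Int :=
    match st.2 with
    | none => some gap
    | some m => if gap < m then some gap else some m
  let p : Int := if gap < 240 then st.1 + (240 - gap) ^ 2 else st.1
  (p, mg)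

theorem pvStepA_fst (x : Int) (st : Int × Option Int) (y : Int) :
    (pvStepA x st y).1 = if y - x < 240 then st.1 + (240 - (y - x)) ^ 2 else st.1 := rfl

theorem pvStepA_snd (x : Int) (st : Int × Option Int) (y : Int) :
    (pvStepA x st y).2 = pvOmin st.2 (y - x) := by
  cases h : st.2 <;> simp [pvStepA, pvOmin, h]

-- structural form of A's double index loop
def pvLoopA : List Int → Int × Option Int → Int × Option Int
  | [], st => st
  | x :: xs, st => pvLoopA xs (xs.foldl (pvStepA x) st)

-- B's per-element penalty over the seen prefix
def pvSumPen2 (seen : List Int) (x : Int) : Int :=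
  seen.foldl (fun s y => if x - y < 240 then s + (240 - (x - y)) ^ 2 else s) 0

-- total penalty, grouped by the later element (B's grouping)
def pvPB : List Int → List Int → Int
  | _, [] => 0
  | seen, x :: xs => pvSumPen2 seen x + pvPB (seen ++ [x]) xs

def pvStepB (st : Int × Option Int × Option Int × List Int) (x : Int) :
    Int × Option Int × Option Int × List Int :=
  let mg : Option Int :=
    match st.2.2.1 with
    | none => st.2.1
    | some h =>
      let g := x - h
      match st.2.1 with
      | none => some g
      | some m => if g < m then some g else some m
  let p : Int :=
    st.1 + st.2.2.2.foldl (fun s y => if x - y < 240 then s + (240 - (x - y)) ^ 2 else s) 0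
  let hi : Option Int :=
    match st.2.2.1 with
    | none => some x
    | some h => if x > h then some x else some h
  (p, mg, hi, st.2.2.2 ++ [x])

-- ---------- A: index loops = structural loops ----------

theorem bridgeA_aux (slots : List Int) :
    ∀ (d k : Nat), d = slots.length - k → ∀ (st : Int × Option Int),
      (PySem.List.pyRange (k : Int) (slots.length : Int) 1).foldl
        (fun (st : Int × Option Int) (i : Int) =>
          (PySem.List.pyRange (i + 1) (slots.length : Int) 1).foldl
            (fun (st2 : Int × Option Int) (j : Int) =>
              let gap := PySem.List.pyGetD slots j 0 - PySem.List.pyGetD slots i 0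
              let mg : Option Int :=
                match st2.2 with
                | none => some gap
                | some m => if gap < m then some gap else some m
              let p : Int := if gap < 240 then st2.1 + (240 - gap) ^ 2 else st2.1
              (p, mg))
            st)
        st
      = pvLoopA (slots.drop k) st := by
  intro d
  induction d with
  | zero =>
    intro k hk st
    have hlen : slots.length ≤ k := by omega
    rw [PySem.List.pyRange_one_eq_nil (by exact_mod_cast hlen),
        List.drop_eq_nil_of_le hlen]
    simp [pvLoopA]
  | succ d ih =>
    intro k hk st
    have hklt : k < slots.length := by omega
    rw [PySem.List.pyRange_one_cons (by exact_mod_cast hklt)]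
    rw [List.foldl_cons]
    have hlen' : (slots.length : Int) = PySem.List.len slots := (PySem.List.len_eq slots).symm
    have hinner :
        (PySem.List.pyRange ((k : Int) + 1) (slots.length : Int) 1).foldl
          (fun (st2 : Int × Option Int) (j : Int) =>
            let gap := PySem.List.pyGetD slots j 0 - PySem.List.pyGetD slots (k : Int) 0
            let mg : Option Int :=
              match st2.2 with
              | none => some gap
              | some m => if gap < m then some gap else some m
            let p : Int := if gap < 240 then st2.1 + (240 - gap) ^ 2 else st2.1
            (p, mg))
          st
        = (slots.drop (k + 1)).foldl (pvStepA slots[k]) st := by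
      rw [hlen']
      have key := PySem.List.foldl_pyRange_pyGetD (a := (k : Int) + 1) slots 0
        (pvStepA (PySem.List.pyGetD slots (k : Int) 0)) st (by omega)
      have htn : ((k : Int) + 1).toNat = k + 1 := by omega
      rw [htn] at key
      have hget : PySem.List.pyGetD slots (k : Int) 0 = slots[k] := by
        rw [PySem.List.pyGetD_natCast, List.getD_eq_getElem _ _ hklt]
      rw [hget] at key
      rw [hget]
      have hfun :
          (fun (st2 : Int × Option Int) (j : Int) =>
            let gap := PySem.List.pyGetD slots j 0 - slots[k]
            let mg : Option Int :=
              match st2.2 with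
              | none => some gap
              | some m => if gap < m then some gap else some m
            let p : Int := if gap < 240 then st2.1 + (240 - gap) ^ 2 else st2.1
            (p, mg))
          = (fun (acc : Int × Option Int) (j : Int) =>
              pvStepA slots[k] acc (PySem.List.pyGetD slots j 0)) := by
        funext st2 j
        cases hm : st2.2 <;> simp [pvStepA, hm]
      rw [hfun]
      exact key
    rw [hinner]
    have hdrop : slots.drop k = slots[k] :: slots.drop (k + 1) :=
      List.drop_eq_getElem_cons hklt
    rw [hdrop]
    show _ = pvLoopA (slots.drop (k + 1)) ((slots.drop (k + 1)).foldl (pvStepA slots[k]) st)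
    exact ih (k + 1) (by omega) _

theorem bridgeA (slots : List Int) :
    rest_penalty_and_min_gap_py slots = pvLoopA slots (0, none) := by
  have h := bridgeA_aux slots slots.length 0 (by omega) (0, none)
  simpa [rest_penalty_and_min_gap_py] using h

-- ---------- A's structural loop computes (pvP, fold of pvOmin over pvGapsA) ----------

theorem foldl_stepA (x : Int) :
    ∀ (ys : List Int) (st : Int × Option Int),
      ys.foldl (pvStepA x) st
        = (st.1 + (ys.map (pvPen x)).sum, (ys.map (· - x)).foldl pvOmin st.2) := by
  intro ys
  induction ys with
  | nil => intro st; simp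
  | cons y ys ih =>
    intro st
    rw [List.foldl_cons, ih]
    simp only [List.map_cons, List.sum_cons, List.foldl_cons, Prod.mk.injEq]
    rw [pvStepA_fst, pvStepA_snd]
    simp only [pvPen]
    refine ⟨?_, trivial⟩
    split_ifs <;> ring

theorem loopA_eq :
    ∀ (l : List Int) (st : Int × Option Int),
      pvLoopA l st = (st.1 + pvP l, (pvGapsA l).foldl pvOmin st.2) := by
  intro l
  induction l with
  | nil => intro st; simp [pvLoopA, pvP, pvGapsA]
  | cons x xs ih =>
    intro st
    rw [pvLoopA, ih, foldl_stepA]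
    simp only [pvP, pvGapsA, List.foldl_append]
    rw [add_assoc]

-- ---------- B's fold ----------

theorem foldl_stepB :
    ∀ (l : List Int) (p : Int) (mg : Option Int) (h : Int) (seen : List Int),
      l.foldl pvStepB (p, mg, some h, seen)
        = (p + pvPB seen l, (pvGapsB h l).foldl pvOmin mg, some (l.foldl max h), seen ++ l) := by
  intro l
  induction l with
  | nil => intro p mg h seen; simp [pvPB, pvGapsB]
  | cons x xs ih =>
    intro p mg h seen
    rw [List.foldl_cons]
    have hstep :
        pvStepB (p, mg, some h, seen) x
          = (p + pvSumPen2 seen x, pvOmin mg (x - h), some (max h x), seen ++ [x]) := by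
      simp only [pvStepB, pvSumPen2, pvOmin]
      have hmax : (if x > h then some x else some h) = some (max h x) := by
        by_cases hlt : h < x
        · rw [if_pos hlt, max_eq_right hlt.le]
        · rw [if_neg hlt, max_eq_left (by omega)]
      rw [hmax]
    rw [hstep, ih]
    simp only [pvPB, pvGapsB, List.foldl_cons, List.append_assoc, List.singleton_append]
    rw [add_assoc]

-- B's penalty grouping equals A's grouping
theorem pvSumPen2_eq (x : Int) :
    ∀ (seen : List Int) (s : Int),
      seen.foldl (fun s y => if x - y < 240 then s + (240 - (x - y)) ^ 2 else s) s
        = s + (seen.map (fun y => pvPen y x)).sum := by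
  intro seen
  induction seen with
  | nil => intro s; simp
  | cons z zs ih =>
    intro s
    rw [List.foldl_cons, ih]
    simp only [List.map_cons, List.sum_cons, pvPen]
    split_ifs <;> ring

theorem pv_sum_map_add (f g : Int → Int) :
    ∀ (l : List Int), (l.map (fun y => f y + g y)).sum = (l.map f).sum + (l.map g).sum := by
  intro l
  induction l with
  | nil => simp
  | cons w ws ihw =>
    simp only [List.map_cons, List.sum_cons, ihw]
    ring

theorem pvPB_eq :
    ∀ (l seen : List Int),
      pvPB seen l = (l.map (fun y => (seen.map (fun z => pvPen z y)).sum)).sum + pvP l := by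
  intro l
  induction l with
  | nil => intro seen; simp [pvPB, pvP]
  | cons x xs ih =>
    intro seen
    show pvSumPen2 seen x + pvPB (seen ++ [x]) xs = _
    rw [ih]
    have h1 : pvSumPen2 seen x = (seen.map (fun z => pvPen z x)).sum := by
      rw [pvSumPen2, pvSumPen2_eq]
      ring
    have h2 : (fun y => (((seen ++ [x]).map (fun z => pvPen z y)).sum))
        = (fun y => (seen.map (fun z => pvPen z y)).sum + pvPen x y) := by
      funext y; simp
    have h3 : (xs.map (fun y => ((seen ++ [x]).map (fun z => pvPen z y)).sum)).sum
        = (xs.map (fun y => (seen.map (fun z => pvPen z y)).sum)).sum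
          + (xs.map (fun y => pvPen x y)).sum := by
      rw [h2]
      exact pv_sum_map_add _ _ xs
    rw [h1, h3]
    simp only [List.map_cons, List.sum_cons, pvP]
    ring

-- ---------- min characterization ----------

theorem fold_omin_some :
    ∀ (gs : List Int) (v : Int), gs.foldl pvOmin (some v) = some (gs.foldl min v) := by
  intro gs
  induction gs with
  | nil => intro v; rfl
  | cons g gs ih =>
    intro v
    rw [List.foldl_cons, List.foldl_cons]
    have : pvOmin (some v) g = some (min v g) := by
      simp only [pvOmin]
      split_ifs with hg
      · rw [min_eq_right hg.le]
      · rw [min_eq_left (by omega)]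
    rw [this, ih]

theorem foldlMin_le_init : ∀ (gs : List Int) (v : Int), gs.foldl min v ≤ v := by
  intro gs
  induction gs with
  | nil => intro v; simp
  | cons g gs ih =>
    intro v
    rw [List.foldl_cons]
    exact le_trans (ih (min v g)) (by omega)

theorem foldlMin_le_mem :
    ∀ (gs : List Int) (v b : Int), b ∈ gs → gs.foldl min v ≤ b := by
  intro gs
  induction gs with
  | nil => intro v b hb; simp at hb
  | cons g gs ih =>
    intro v b hb
    rw [List.foldl_cons]
    rcases List.mem_cons.mp hb with h | h
    · subst h
      exact le_trans (foldlMin_le_init gs (min v b)) (by omega)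
    · exact ih _ b h

theorem foldlMin_mem_or :
    ∀ (gs : List Int) (v : Int), gs.foldl min v = v ∨ gs.foldl min v ∈ gs := by
  intro gs
  induction gs with
  | nil => intro v; left; rfl
  | cons g gs ih =>
    intro v
    rw [List.foldl_cons]
    rcases ih (min v g) with h | h
    · by_cases hvg : v ≤ g
      · left; rw [h, min_eq_left hvg]
      · right
        rw [h, min_eq_right (by omega)]
        exact List.mem_cons_self ..
    · right; exact List.mem_cons_of_mem _ h

-- ---------- gapsB ⊆ gapsA' and gapsB dominates gapsA' from below ----------

theorem gapsB_subset :
    ∀ (l : List Int) (h g : Int), g ∈ pvGapsB h l → g ∈ pvGapsA' h l := by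
  intro l
  induction l with
  | nil => intro h g hg; simp [pvGapsB] at hg
  | cons x xs ih =>
    intro h g hg
    rw [pvGapsB] at hg
    rw [pvGapsA']
    rcases List.mem_cons.mp hg with hg | hg
    · apply List.mem_append_left
      exact List.mem_map.mpr ⟨x, List.mem_cons_self .., hg.symm⟩
    · have hmem := ih (max h x) g hg
      rw [pvGapsA'] at hmem
      rcases List.mem_append.mp hmem with hmap | hrest
      · obtain ⟨y, hy, hyg⟩ := List.mem_map.mp hmap
        rcases max_choice h x with hm | hm
        · apply List.mem_append_left
          exact List.mem_map.mpr ⟨y, List.mem_cons_of_mem x hy, by rw [← hyg, hm]⟩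
        · apply List.mem_append_right
          rw [pvGapsA]
          apply List.mem_append_left
          exact List.mem_map.mpr ⟨y, hy, by rw [← hyg, hm]⟩
      · apply List.mem_append_right
        rw [pvGapsA]
        exact List.mem_append_right _ hrest

theorem gapsB_dominates :
    ∀ (l : List Int) (h a : Int), a ∈ pvGapsA' h l → ∃ b ∈ pvGapsB h l, b ≤ a := by
  intro l
  induction l with
  | nil => intro h a ha; simp [pvGapsA', pvGapsA] at ha
  | cons x xs ih =>
    intro h a ha
    rw [pvGapsA'] at ha
    have hhead : x - h ∈ pvGapsB h (x :: xs) := by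
      rw [pvGapsB]; exact List.mem_cons_self ..
    have htail : ∀ b, b ∈ pvGapsB (max h x) xs → b ∈ pvGapsB h (x :: xs) := by
      intro b hb
      rw [pvGapsB]
      exact List.mem_cons_of_mem _ hb
    rcases List.mem_append.mp ha with hmap | hrest
    · obtain ⟨y, hy, hya⟩ := List.mem_map.mp hmap
      rcases List.mem_cons.mp hy with hyx | hy
      · exact ⟨x - h, hhead, by rw [← hya, hyx]⟩
      · have hmem : y - max h x ∈ pvGapsA' (max h x) xs := by
          rw [pvGapsA']
          exact List.mem_append_left _ (List.mem_map.mpr ⟨y, hy, rfl⟩)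
        obtain ⟨b, hb, hble⟩ := ih (max h x) _ hmem
        exact ⟨b, htail b hb,
          le_trans hble (by have := le_max_left h x; omega)⟩
    · rw [pvGapsA] at hrest
      rcases List.mem_append.mp hrest with hmap | hrest
      · obtain ⟨y, hy, hya⟩ := List.mem_map.mp hmap
        have hmem : y - max h x ∈ pvGapsA' (max h x) xs := by
          rw [pvGapsA']
          exact List.mem_append_left _ (List.mem_map.mpr ⟨y, hy, rfl⟩)
        obtain ⟨b, hb, hble⟩ := ih (max h x) _ hmem
        exact ⟨b, htail b hb,
          le_trans hble (by have := le_max_right h x; omega)⟩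
      · have hmem : a ∈ pvGapsA' (max h x) xs := by
          rw [pvGapsA']
          exact List.mem_append_right _ hrest
        obtain ⟨b, hb, hble⟩ := ih (max h x) _ hmem
        exact ⟨b, htail b hb, hble⟩

-- the two candidate lists have the same minimum
theorem min_gaps_eq (x : Int) (xs : List Int) :
    (pvGapsA' x xs).foldl pvOmin none = (pvGapsB x xs).foldl pvOmin none := by
  cases xs with
  | nil => rfl
  | cons y ys =>
    -- both lists start with y - x
    have hA : pvGapsA' x (y :: ys) = (y - x) :: (ys.map (· - x) ++ pvGapsA (y :: ys)) := by
      simp [pvGapsA', pvGapsA]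
    have hB : pvGapsB x (y :: ys) = (y - x) :: pvGapsB (max x y) ys := rfl
    rw [hA, hB, List.foldl_cons, List.foldl_cons]
    show (ys.map (· - x) ++ pvGapsA (y :: ys)).foldl pvOmin (pvOmin none (y - x))
        = (pvGapsB (max x y) ys).foldl pvOmin (pvOmin none (y - x))
    have hinit : pvOmin none (y - x) = some (y - x) := rfl
    rw [hinit, fold_omin_some, fold_omin_some]
    congr 1
    -- both are the min of all pairwise gaps of x :: y :: ys
    set LA := ys.map (· - x) ++ pvGapsA (y :: ys) with hLA
    set LB := pvGapsB (max x y) ys with hLB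
    have hsub : ∀ g ∈ LB, g ∈ (y - x) :: LA := by
      intro g hg
      have : g ∈ pvGapsB x (y :: ys) := by rw [hB]; exact List.mem_cons_of_mem _ hg
      have := gapsB_subset _ x g this
      rw [hA] at this
      exact this
    have hdom : ∀ a ∈ LA, ∃ b ∈ (y - x) :: LB, b ≤ a := by
      intro a ha
      have : a ∈ pvGapsA' x (y :: ys) := by rw [hA]; exact List.mem_cons_of_mem _ ha
      obtain ⟨b, hb, hble⟩ := gapsB_dominates _ x a this
      rw [hB] at hb
      exact ⟨b, hb, hble⟩
    apply le_antisymm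
    · -- min over LA ≤ min over LB
      rcases foldlMin_mem_or LB (y - x) with h | h
      · rw [h]; exact foldlMin_le_init LA (y - x)
      · rcases List.mem_cons.mp (hsub _ h) with he | he
        · rw [he]; exact foldlMin_le_init LA (y - x)
        · exact foldlMin_le_mem LA (y - x) _ he
    · -- min over LB ≤ min over LA
      rcases foldlMin_mem_or LA (y - x) with h | h
      · rw [h]; exact foldlMin_le_init LB (y - x)
      · obtain ⟨b, hb, hble⟩ := hdom _ h
        rcases List.mem_cons.mp hb with he | he
        · calc LB.foldl min (y - x) ≤ y - x := foldlMin_le_init LB (y - x)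
            _ = b := he.symm
            _ ≤ LA.foldl min (y - x) := hble
        · calc LB.foldl min (y - x) ≤ b := foldlMin_le_mem LB (y - x) b he
            _ ≤ LA.foldl min (y - x) := hble

-- ---------- assembling both sides ----------

theorem portA_closed (slots : List Int) :
    rest_penalty_and_min_gap_py slots = (pvP slots, (pvGapsA slots).foldl pvOmin none) := by
  rw [bridgeA, loopA_eq]
  simp

theorem portB_closed :
    ∀ (x : Int) (xs : List Int),
      rest_penalty_and_min_gap_py_alt (x :: xs)
        = (pvPB [x] xs, (pvGapsB x xs).foldl pvOmin none) := by
  intro x xs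
  show (((x :: xs).foldl pvStepB (0, none, none, [])).1,
        ((x :: xs).foldl pvStepB (0, none, none, [])).2.1)
      = _
  rw [List.foldl_cons]
  have hfirst : pvStepB (0, none, none, []) x = (0, none, some x, [x]) := by
    simp [pvStepB]
  rw [hfirst, foldl_stepB]
  simp

theorem penalty_eq (x : Int) (xs : List Int) : pvPB [x] xs = pvP (x :: xs) := by
  rw [pvPB_eq]
  simp only [List.map_cons, List.map_nil, List.sum_cons, List.sum_nil, pvP]
  have : (xs.map (fun y => pvPen x y + 0)).sum = (xs.map (pvPen x)).sum := by
    simp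
  rw [this]

-- ===== VERDICT (by name: the statement is the Claim_ definition above) =====
theorem rest_penalty_and_min_gap_py_spec : Claim_equal_rest_penalty_and_min_gap_py := by
  intro slots _
  show rest_penalty_and_min_gap_py slots = rest_penalty_and_min_gap_py_alt slots
  cases slots with
  | nil => rfl
  | cons x xs =>
    rw [portA_closed, portB_closed, penalty_eq]
    have : pvGapsA (x :: xs) = pvGapsA' x xs := rfl
    rw [this, min_gaps_eq]
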